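-- pv_equiv track=rewrite | github.com/idemia/multigit | src/mg_utils.py | handle_cr_in_text
-- ===== SOURCE A (Python) =====
-- def handle_cr_in_text(s: str) -> str:
--     '''Handle CR in output text: the line after the CR overwrite the previous line'''
--     lines = s.split('\n')
--     out_lines = []
--     for l in lines:
--         if '\r' in l:
--             if l[-1] == '\r':
--                 l = l[:-1]
--
--             sublines = l.split('\r')
--             l = sublines[-1]
--         out_lines.append(l)
--
--     return '\n'.join(out_lines)
-- ===== SOURCE B (Python) =====
-- def handle_cr_in_text(s: str) -> str:
--     '''Handle CR in output text: the line after the CR overwrite the previous line'''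
--     out = []
--     cur = []
--     i = 0
--     n = len(s)
--     while i < n:
--         c = s[i]
--         if c == '\n':
--             out.extend(cur)
--             out.append('\n')
--             cur = []
--         elif c == '\r':
--             # a CR right before a newline (or at end of text) is dropped;
--             # any other CR discards the current line so far
--             if not (i + 1 == n or s[i + 1] == '\n'):
--                 cur = []
--         else:
--             cur.append(c)
--         i += 1
--     out.extend(cur)
--     return ''.join(out)
-- ===== Notes on version B (the rewrite author's own statement) =====
-- stated objective: alternative
-- what changed: Replaced the split-on-newline / per-line split-on-CR / join pipeline with a single left-to-right character scan with one-character lookahead: a CR immediately before a newline or at end of text is dropped, any other CR resets the current-line buffer, so no splitting or joining ever happens.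
import Mathlib
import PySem

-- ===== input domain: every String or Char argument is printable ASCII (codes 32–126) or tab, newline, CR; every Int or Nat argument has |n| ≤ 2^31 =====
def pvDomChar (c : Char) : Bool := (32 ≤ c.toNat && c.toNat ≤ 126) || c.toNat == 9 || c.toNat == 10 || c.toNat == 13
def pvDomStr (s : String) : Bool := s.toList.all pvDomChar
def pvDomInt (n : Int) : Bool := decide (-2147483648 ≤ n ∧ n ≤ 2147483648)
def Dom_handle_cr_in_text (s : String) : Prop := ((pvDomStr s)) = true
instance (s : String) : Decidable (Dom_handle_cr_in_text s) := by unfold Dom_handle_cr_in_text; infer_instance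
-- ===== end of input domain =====

-- B replaces A's split-on-newline / split-on-CR / join pipeline by a single left-to-right
-- character scan with one-character lookahead (objective: alternative, same asymptotic cost).

-- ===== PORT A =====
-- per-line body of A's for-loop: strip one trailing CR, keep the text after the last CR
def pvLineA (l : String) : String :=
  if PySem.Str.isIn "\r" l = true then
    let l2 := if PySem.Str.pyGet? l (-1) = some '\r' then PySem.Str.slice l none (some (-1)) else l
    let sublines := (PySem.Str.split? l2 "\r").getD []      -- sep ≠ "" : never none
    (PySem.List.pyGet? sublines (-1)).getD ""               -- sublines is never empty
  else l

def handle_cr_in_text (s : String) : String :=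
  let lines := (PySem.Str.split? s "\n").getD []            -- sep ≠ "" : never none
  let out_lines := lines.foldl (fun out l => out ++ [pvLineA l]) ([] : List String)
  PySem.Str.join "\n" out_lines

-- ===== PORT B =====
-- the while-loop of Source B: cur = current line buffer, out = emitted output, lookahead on CR
def pvGo : List Char → List Char → List Char → List Char
  | [], cur, out => out ++ cur
  | c :: t, cur, out =>
    if c = '\n' then pvGo t [] (out ++ cur ++ ['\n'])
    else if c = '\r' then
      (match t with
       | [] => pvGo t cur out                               -- CR at end of text: dropped
       | c' :: _ => if c' = '\n' then pvGo t cur out        -- CR before newline: dropped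
                    else pvGo t [] out)                     -- other CR: discard current line
    else pvGo t (cur ++ [c]) out

def handle_cr_in_text_alt (s : String) : String := String.ofList (pvGo s.toList [] [])

-- ===== PRECONDITION & SPEC =====
def Spec_handle_cr_in_text (s : String) (out : String) : Prop := out = handle_cr_in_text_alt s
instance (s : String) (out : String) : Decidable (Spec_handle_cr_in_text s out) := by unfold Spec_handle_cr_in_text; infer_instance

-- ===== CLAIM (what is proved, stated in full; the proofs are below) =====
def Claim_equal_handle_cr_in_text : Prop := ∀ (s : String), Dom_handle_cr_in_text s → Spec_handle_cr_in_text s (handle_cr_in_text s)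

-- ===== LEMMAS AND PROOFS =====

-- clean structural recursion equal to PySem.Chars.splitOn for a single-character separator
def pvSplit (c : Char) : List Char → List (List Char)
  | [] => [[]]
  | a :: t => if a = c then [] :: pvSplit c t else (pvSplit c t).modifyHead (a :: ·)

-- drop one leading CR (= one trailing CR of the un-reversed line)
def pvDropCR : List Char → List Char
  | [] => []
  | a :: t => if a = '\r' then t else a :: t

-- "not the separator" as a named Bool predicate (keeps simp normal forms stable)
def pvKeep (c : Char) (x : Char) : Bool := x != c

-- the value A's per-line processing produces, as one formula
def pvFix (l : List Char) : List Char := ((pvDropCR l.reverse).takeWhile (pvKeep '\r')).reverse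

theorem pvSplit_nil (c : Char) : pvSplit c [] = [[]] := rfl

theorem pvSplit_sep (c : Char) (t : List Char) : pvSplit c (c :: t) = [] :: pvSplit c t := by
  simp [pvSplit]

theorem pvSplit_other (c a : Char) (t : List Char) (h : a ≠ c) :
    pvSplit c (a :: t) = (pvSplit c t).modifyHead (a :: ·) := by
  simp [pvSplit, h]

theorem pvSplit_ne_nil (c : Char) (x : List Char) : pvSplit c x ≠ [] := by
  induction x with
  | nil => simp [pvSplit]
  | cons a t ih =>
    simp only [pvSplit]
    split_ifs
    · simp
    · cases h : pvSplit c t with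
      | nil => exact absurd h ih
      | cons hd tl => simp [List.modifyHead]

theorem pvSplit_length (c : Char) (x : List Char) : (pvSplit c x).length = x.count c + 1 := by
  induction x with
  | nil => simp [pvSplit]
  | cons a t ih =>
    simp only [pvSplit]
    split_ifs with h
    · subst h; simp [ih]
    · simp [List.length_modifyHead, ih, h]

theorem pv_splitOn_go (c : Char) (fuel : Nat) : ∀ (l cur : List Char) (acc : List (List Char)),
    l.length < fuel →
    PySem.Chars.splitOn.go [c] fuel l cur acc
      = acc.reverse ++ (pvSplit c l).modifyHead (cur.reverse ++ ·) := by
  induction fuel with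
  | zero => intro l cur acc h; omega
  | succ n ih =>
    intro l cur acc h
    cases l with
    | nil =>
      rw [PySem.Chars.splitOn.go.eq_def]
      simp [pvSplit]
    | cons a t =>
      rw [PySem.Chars.splitOn.go.eq_def]
      by_cases hac : c = a
      · subst hac
        have hpre : [c].isPrefixOf (c :: t) = true := by simp [List.isPrefixOf]
        simp only [hpre, if_true, List.length_cons, List.length_nil, Nat.zero_add,
          List.drop_succ_cons, List.drop_zero]
        rw [ih t [] (cur.reverse :: acc) (by simpa using h)]
        obtain ⟨hd, tl, he⟩ := List.exists_cons_of_ne_nil (pvSplit_ne_nil c t)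
        simp [pvSplit_sep, he, List.modifyHead]
      · have hpre : [c].isPrefixOf (a :: t) = false := by
          simp only [List.isPrefixOf, Bool.and_true, beq_eq_false_iff_ne, ne_eq]
          exact hac
        simp only [hpre, Bool.false_eq_true, if_false]
        rw [ih t (a :: cur) acc (by simpa using h)]
        obtain ⟨hd, tl, he⟩ := List.exists_cons_of_ne_nil (pvSplit_ne_nil c t)
        rw [pvSplit_other c a t (fun hh => hac hh.symm), he]
        simp [List.modifyHead]

theorem pv_splitOn_single (l : List Char) (c : Char) :
    PySem.Chars.splitOn l [c] = pvSplit c l := by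
  unfold PySem.Chars.splitOn
  rw [pv_splitOn_go c (l.length + 1) l [] [] (by omega)]
  obtain ⟨hd, tl, he⟩ := List.exists_cons_of_ne_nil (pvSplit_ne_nil c l)
  simp [he, List.modifyHead]

theorem pv_split?_single (l : List Char) (c : Char) :
    PySem.Chars.split? l [c] = some (pvSplit c l) := by
  simp [PySem.Chars.split?, pv_splitOn_single]

theorem pv_takeWhile_append_ne (c : Char) (a b : List Char) :
    (a ++ c :: b).takeWhile (pvKeep c) = a.takeWhile (pvKeep c) := by
  induction a with
  | nil => simp [pvKeep]
  | cons x t ih => simp only [List.cons_append, List.takeWhile_cons, ih]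

theorem pv_takeWhile_all (c : Char) (l : List Char) (h : c ∉ l) :
    l.takeWhile (pvKeep c) = l := by
  apply List.takeWhile_eq_self_iff.mpr
  intro x hx
  simp only [pvKeep, bne_iff_ne, ne_eq]
  intro hh
  exact h (by rwa [hh] at hx)

theorem pv_takeWhile_snoc (c a : Char) (l : List Char) (hmem : c ∈ l) :
    (l ++ [a]).takeWhile (pvKeep c) = l.takeWhile (pvKeep c) := by
  obtain ⟨u, v, huv⟩ := List.append_of_mem hmem
  subst huv
  rw [pv_takeWhile_append_ne]
  have h2 : (u ++ c :: v) ++ [a] = u ++ c :: (v ++ [a]) := by simp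
  rw [h2, pv_takeWhile_append_ne]

theorem pvFix_no_cr (l : List Char) (h : '\r' ∉ l) : pvFix l = l := by
  unfold pvFix
  have hrev : '\r' ∉ l.reverse := by simpa using h
  have hd : pvDropCR l.reverse = l.reverse := by
    cases hc : l.reverse with
    | nil => simp [pvDropCR]
    | cons a t =>
      have ha : a ≠ '\r' := by
        intro hh
        exact hrev (by rw [hc, hh]; exact List.mem_cons_self)
      simp [pvDropCR, ha]
  rw [hd, pv_takeWhile_all _ _ hrev, List.reverse_reverse]

theorem pvFix_trailing (x : List Char) (h : '\r' ∉ x) : pvFix (x ++ ['\r']) = x := by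
  unfold pvFix
  have hrev : '\r' ∉ x.reverse := by simpa using h
  have h1 : (x ++ ['\r']).reverse = '\r' :: x.reverse := by simp
  rw [h1]
  have h2 : pvDropCR ('\r' :: x.reverse) = x.reverse := by simp [pvDropCR]
  rw [h2, pv_takeWhile_all _ _ hrev, List.reverse_reverse]

theorem pvFix_mid (x l : List Char) (h : l ≠ []) : pvFix (x ++ '\r' :: l) = pvFix l := by
  unfold pvFix
  obtain ⟨hd, tl, he⟩ := List.exists_cons_of_ne_nil (List.reverse_ne_nil_iff.mpr h)
  have h1 : (x ++ '\r' :: l).reverse = hd :: (tl ++ '\r' :: x.reverse) := by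
    simp [List.reverse_append, he]
  rw [h1, he]
  by_cases hhd : hd = '\r'
  · have e1 : pvDropCR (hd :: (tl ++ '\r' :: x.reverse)) = tl ++ '\r' :: x.reverse := by
      simp [pvDropCR, hhd]
    have e2 : pvDropCR (hd :: tl) = tl := by simp [pvDropCR, hhd]
    rw [e1, e2, pv_takeWhile_append_ne]
  · have e1 : pvDropCR (hd :: (tl ++ '\r' :: x.reverse)) = hd :: (tl ++ '\r' :: x.reverse) := by
      simp [pvDropCR, hhd]
    have e2 : pvDropCR (hd :: tl) = hd :: tl := by simp [pvDropCR, hhd]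
    rw [e1, e2]
    have h2 : hd :: (tl ++ '\r' :: x.reverse) = (hd :: tl) ++ '\r' :: x.reverse := by simp
    rw [h2, pv_takeWhile_append_ne]

theorem pv_getLast?_pvSplit (c : Char) (x : List Char) :
    (pvSplit c x).getLast? = some ((x.reverse.takeWhile (pvKeep c)).reverse) := by
  induction x with
  | nil => simp [pvSplit]
  | cons a t ih =>
    simp only [List.reverse_cons]
    by_cases h : a = c
    · subst h
      rw [pvSplit_sep]
      have hsn : (t.reverse ++ [a]).takeWhile (pvKeep a) = t.reverse.takeWhile (pvKeep a) := by
        have e : t.reverse ++ [a] = t.reverse ++ a :: [] := rfl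
        rw [e, pv_takeWhile_append_ne]
      rw [hsn]
      obtain ⟨hd, tl, he⟩ := List.exists_cons_of_ne_nil (pvSplit_ne_nil a t)
      rw [he] at ih ⊢
      simpa using ih
    · rw [pvSplit_other c a t h]
      obtain ⟨hd, tl, he⟩ := List.exists_cons_of_ne_nil (pvSplit_ne_nil c t)
      rw [he] at ih ⊢
      cases tl with
      | cons y ys =>
        have hcmem : c ∈ t := by
          have hlen := pvSplit_length c t
          rw [he] at hlen
          simp only [List.length_cons] at hlen
          have : 0 < t.count c := by omega
          exact List.count_pos_iff.mp this
        have hcrev : c ∈ t.reverse := by simpa using hcmem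
        rw [pv_takeWhile_snoc c a t.reverse hcrev]
        simpa [List.modifyHead] using ih
      | nil =>
        -- pvSplit c t = [hd] : t contains no c, so hd = t
        have hcount : t.count c = 0 := by
          have hlen := pvSplit_length c t
          rw [he] at hlen
          simpa using hlen
        have hmem : c ∉ t := by simpa using List.count_eq_zero.mp hcount
        have hmemrev : c ∉ t.reverse := by simpa using hmem
        have htw : t.reverse.takeWhile (pvKeep c) = t.reverse := pv_takeWhile_all c _ hmemrev
        have hhd : hd = t := by
          have h2 := ih
          simp only [List.getLast?_singleton, Option.some_inj] at h2
          rw [htw, List.reverse_reverse] at h2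
          exact h2
        have htw2 : (t.reverse ++ [a]).takeWhile (pvKeep c) = t.reverse ++ [a] := by
          apply pv_takeWhile_all
          intro hm
          rcases List.mem_append.mp hm with h1 | h1
          · exact hmemrev h1
          · exact h ((List.mem_singleton.mp h1).symm)
        simp [List.modifyHead, htw2, hhd]

theorem pv_intercalate_singleton (x : List Char) : List.intercalate ['\n'] [x] = x := by
  simp [List.intercalate]

theorem pv_intercalate_cons (x : List Char) (L : List (List Char)) (h : L ≠ []) :
    List.intercalate ['\n'] (x :: L) = x ++ '\n' :: List.intercalate ['\n'] L := by
  cases L with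
  | nil => exact absurd rfl h
  | cons y ys => simp [List.intercalate]

theorem pv_mapFix_ne_nil (x : List Char) : List.map pvFix (pvSplit '\n' x) ≠ [] := by
  intro hh
  exact pvSplit_ne_nil '\n' x (List.map_eq_nil_iff.mp hh)

theorem pv_toList_r : String.toList "\r" = ['\r'] := by decide

theorem pv_toList_n : String.toList "\n" = ['\n'] := by decide

-- the last element of a CR-split, as produced by A (sublines[-1])
theorem pv_parts_last (x : List Char) (parts : List String)
    (hmap : List.map String.toList parts = pvSplit '\r' x) (hpne : parts ≠ []) :
    ((PySem.List.pyGet? parts (-1)).getD "").toList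
      = (x.reverse.takeWhile (pvKeep '\r')).reverse := by
  rw [PySem.List.pyGet?_neg_one, List.getLast?_eq_some_getLast hpne]
  have h1 : (List.map String.toList parts).getLast? = some ((parts.getLast hpne).toList) := by
    rw [List.getLast?_map, List.getLast?_eq_some_getLast hpne]
    rfl
  rw [hmap, pv_getLast?_pvSplit] at h1
  simpa using h1.symm

-- A's per-line processing computes pvFix
theorem pvLineA_toList (l : String) : (pvLineA l).toList = pvFix l.toList := by
  by_cases hcr : '\r' ∈ l.toList
  · have hIn : PySem.Str.isIn "\r" l = true := by
      simp only [PySem.Str.isIn]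
      rw [PySem.Chars.isIn_iff_infix, pv_toList_r]
      exact (List.singleton_infix_iff _ _).mpr hcr
    have hne : l.toList ≠ [] := by rintro he; rw [he] at hcr; simp at hcr
    have hget : PySem.Str.pyGet? l (-1) = some (l.toList.getLast hne) := by
      simp [PySem.Str.pyGet?, PySem.List.pyGet?_neg_one, List.getLast?_eq_some_getLast hne]
    by_cases hl : l.toList.getLast hne = '\r'
    · -- one trailing CR is stripped first
      have hif : (if PySem.Str.pyGet? l (-1) = some '\r'
          then PySem.Str.slice l none (some (-1)) else l) = PySem.Str.slice l none (some (-1)) := by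
        rw [if_pos (by rw [hget, hl])]
      have hsl : (PySem.Str.slice l none (some (-1))).toList = l.toList.dropLast := by
        rw [PySem.Str.toList_slice]
        simp [PySem.Chars.slice_eq_listSlice, PySem.List.slice_to_neg_one]
      have hsplit := PySem.Str.split?_map (PySem.Str.slice l none (some (-1))) "\r"
      rw [hsl, pv_toList_r, pv_split?_single] at hsplit
      obtain ⟨parts, hp, hmap⟩ := Option.map_eq_some_iff.mp hsplit
      have hpne : parts ≠ [] := by
        rintro rfl
        exact pvSplit_ne_nil '\r' l.toList.dropLast (by simpa using hmap.symm)
      simp only [pvLineA, hIn, if_true, hif, hp, Option.getD_some]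
      rw [pv_parts_last _ parts hmap hpne]
      -- pvFix of the original line
      unfold pvFix
      have hrw : l.toList.reverse = '\r' :: l.toList.dropLast.reverse := by
        conv_lhs => rw [← List.dropLast_append_getLast hne, hl]
        simp
      rw [hrw]
      have h2 : pvDropCR ('\r' :: l.toList.dropLast.reverse) = l.toList.dropLast.reverse := by
        simp [pvDropCR]
      rw [h2]
    · -- no trailing CR
      have hif : (if PySem.Str.pyGet? l (-1) = some '\r'
          then PySem.Str.slice l none (some (-1)) else l) = l := by
        rw [if_neg]
        rw [hget]
        simp [hl]
      have hsplit := PySem.Str.split?_map l "\r"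
      rw [pv_toList_r, pv_split?_single] at hsplit
      obtain ⟨parts, hp, hmap⟩ := Option.map_eq_some_iff.mp hsplit
      have hpne : parts ≠ [] := by
        rintro rfl
        exact pvSplit_ne_nil '\r' l.toList (by simpa using hmap.symm)
      simp only [pvLineA, hIn, if_true, hif, hp, Option.getD_some]
      rw [pv_parts_last _ parts hmap hpne]
      unfold pvFix
      obtain ⟨hd, tl, he⟩ := List.exists_cons_of_ne_nil (List.reverse_ne_nil_iff.mpr hne)
      have hhd : hd = l.toList.getLast hne := by
        have h2 := List.getLast?_eq_head?_reverse (xs := l.toList)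
        rw [he, List.getLast?_eq_some_getLast hne] at h2
        simpa using h2.symm
      rw [he]
      have h2 : pvDropCR (hd :: tl) = hd :: tl := by
        simp only [pvDropCR]
        rw [if_neg (show ¬(hd = '\r') by rw [hhd]; exact hl)]
      rw [h2]
  · have hIn : PySem.Str.isIn "\r" l = false := by
      simp only [PySem.Str.isIn]
      rw [PySem.Chars.isIn_eq_false_iff, pv_toList_r]
      exact fun hh => hcr ((List.singleton_infix_iff _ _).mp hh)
    simp only [pvLineA, hIn, Bool.false_eq_true, if_false]
    rw [pvFix_no_cr l.toList hcr]

-- step equations of the scan pvGo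
theorem pvGo_nil (cur out : List Char) : pvGo [] cur out = out ++ cur := rfl

theorem pvGo_cons_nl (t cur out : List Char) :
    pvGo ('\n' :: t) cur out = pvGo t [] (out ++ cur ++ ['\n']) := by
  rw [pvGo.eq_def]
  simp

theorem pvGo_cons_cr_nil (cur out : List Char) : pvGo ['\r'] cur out = pvGo [] cur out := by
  rw [pvGo.eq_def]
  simp

theorem pvGo_cons_cr_nl (t cur out : List Char) :
    pvGo ('\r' :: '\n' :: t) cur out = pvGo ('\n' :: t) cur out := by
  rw [pvGo.eq_def]
  simp

theorem pvGo_cons_cr_other (c : Char) (t cur out : List Char) (h : c ≠ '\n') :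
    pvGo ('\r' :: c :: t) cur out = pvGo (c :: t) [] out := by
  rw [pvGo.eq_def]
  simp [h]

theorem pvGo_cons_other (c : Char) (t cur out : List Char) (h1 : c ≠ '\n') (h2 : c ≠ '\r') :
    pvGo (c :: t) cur out = pvGo t (cur ++ [c]) out := by
  rw [pvGo.eq_def]
  simp [h1, h2]

-- the scan pvGo computes A's split/fix/join value, cur being the pending (CR- and NL-free) line prefix
theorem pvGo_eq (cs : List Char) : ∀ cur out : List Char, '\r' ∉ cur → '\n' ∉ cur →
    pvGo cs cur out
      = out ++ List.intercalate ['\n'] (((pvSplit '\n' cs).modifyHead (cur ++ ·)).map pvFix) := by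
  induction cs with
  | nil =>
    intro cur out hcr hnl
    rw [pvGo_nil, pvSplit_nil]
    simp only [List.modifyHead_cons, List.append_nil, List.map_cons, List.map_nil,
      pvFix_no_cr cur hcr, pv_intercalate_singleton]
  | cons c t ih =>
    intro cur out hcr hnl
    by_cases hc : c = '\n'
    · subst hc
      rw [pvGo_cons_nl, ih [] (out ++ cur ++ ['\n']) (by simp) (by simp), pvSplit_sep]
      obtain ⟨hd, tl, he⟩ := List.exists_cons_of_ne_nil (pvSplit_ne_nil '\n' t)
      rw [he]
      simp only [List.modifyHead_cons, List.nil_append, List.map_cons, List.append_nil]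
      rw [pv_intercalate_cons (pvFix cur) _ (by rw [← List.map_cons, ← he]; exact pv_mapFix_ne_nil t),
        pvFix_no_cr cur hcr]
      simp
    · by_cases hcR : c = '\r'
      · subst hcR
        cases t with
        | nil =>
          rw [pvGo_cons_cr_nil, pvGo_nil, pvSplit_other '\n' '\r' [] (by decide), pvSplit_nil]
          simp only [List.modifyHead_cons, List.map_cons, List.map_nil]
          rw [pv_intercalate_singleton, pvFix_trailing cur hcr]
        | cons c' t' =>
          by_cases hc' : c' = '\n'
          · subst hc'
            rw [pvGo_cons_cr_nl, ih cur out hcr hnl, pvSplit_sep,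
              pvSplit_other '\n' '\r' _ (by decide), pvSplit_sep]
            simp only [List.modifyHead_cons, List.map_cons, List.append_nil]
            rw [pvFix_no_cr cur hcr, pvFix_trailing cur hcr]
          · rw [pvGo_cons_cr_other c' t' cur out hc', ih [] out (by simp) (by simp),
              pvSplit_other '\n' '\r' _ (by decide), pvSplit_other '\n' c' t' hc']
            obtain ⟨hd, tl, he⟩ := List.exists_cons_of_ne_nil (pvSplit_ne_nil '\n' t')
            rw [he]
            simp only [List.modifyHead_cons, List.nil_append, List.map_cons]
            rw [pvFix_mid cur (c' :: hd) (by simp)]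
      · rw [pvGo_cons_other c t cur out hc hcR]
        have hcr' : '\r' ∉ cur ++ [c] := by
          intro hm
          rcases List.mem_append.mp hm with h1 | h1
          · exact hcr h1
          · exact hcR (List.mem_singleton.mp h1).symm
        have hnl' : '\n' ∉ cur ++ [c] := by
          intro hm
          rcases List.mem_append.mp hm with h1 | h1
          · exact hnl h1
          · exact hc (List.mem_singleton.mp h1).symm
        rw [ih (cur ++ [c]) out hcr' hnl', pvSplit_other '\n' c t hc]
        obtain ⟨hd, tl, he⟩ := List.exists_cons_of_ne_nil (pvSplit_ne_nil '\n' t)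
        rw [he]
        simp [List.modifyHead]

-- ===== VERDICT (by name: the statement is the Claim_ definition above) =====
theorem handle_cr_in_text_spec : Claim_equal_handle_cr_in_text := by
  unfold Claim_equal_handle_cr_in_text
  intro s _
  unfold Spec_handle_cr_in_text
  apply String.toList_inj.mp
  -- A side: split, map pvLineA, join
  have hsplit := PySem.Str.split?_map s "\n"
  rw [pv_toList_n, pv_split?_single] at hsplit
  obtain ⟨parts, hp, hmap⟩ := Option.map_eq_some_iff.mp hsplit
  simp only [handle_cr_in_text, hp, Option.getD_some,
    PySem.List.foldl_append_singleton_eq_map, List.nil_append,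
    PySem.Str.join, String.toList_ofList, PySem.Chars.join, pv_toList_n, List.map_map]
  -- B side: the scan
  simp only [handle_cr_in_text_alt, String.toList_ofList]
  rw [pvGo_eq s.toList [] [] (by simp) (by simp)]
  have hmapfix : List.map (String.toList ∘ pvLineA) parts
      = List.map pvFix (pvSplit '\n' s.toList) := by
    rw [← hmap, List.map_map]
    apply List.map_congr_left
    intro x _
    exact pvLineA_toList x
  rw [hmapfix]
  obtain ⟨hd, tl, he⟩ := List.exists_cons_of_ne_nil (pvSplit_ne_nil '\n' s.toList)
  rw [he]
  simp [List.modifyHead]
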